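-- pv_equiv track=rewrite | github.com/ksayee/programming_assignments | python/algorithms/fb_de_questions.py | EmplDict
-- ===== SOURCE A (Python) =====
-- def EmplDict(lst):
--
--     dict={}
--
--     for i in range(0,len(lst)):
--         if len(lst[i])>1:
--             tmp1=lst[i][0]
--             tmp2=lst[i][1]
--         else:
--             tmp1=lst[i][0]
--             tmp2=''
--
--         if tmp1 in dict.keys() and tmp2!='':
--             dict[tmp1]=dict.get(tmp1)+1
--         elif tmp1 in dict.keys() and tmp2=='':
--             continue
--         elif tmp1 not in dict.keys() and tmp2!='':
--             dict[tmp1]=1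
--         elif tmp1 not in dict.keys() and tmp2=='':
--             dict[tmp1]=0
--
--         if tmp2!='':
--             if tmp2 in dict.keys():
--                 dict[tmp2]=dict.get(tmp2)+1
--             else:
--                 dict[tmp2]=1
--
--     return dict
-- ===== SOURCE B (Python) =====
-- def EmplDict(lst):
--     # Phase 1: flatten into one weighted-token stream:
--     # a pair contributes (a,1),(b,1); a single contributes (a,0).
--     tokens = []
--     for item in lst:
--         a = item[0]
--         b = item[1] if len(item) > 1 else ''
--         if b != '':
--             tokens.append((a, 1))
--             tokens.append((b, 1))
--         else:
--             tokens.append((a, 0))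
--     # Phase 2: one uniform fold, no case analysis.
--     d = {}
--     for t, delta in tokens:
--         d[t] = d.get(t, 0) + delta
--     return d
-- ===== Notes on version B (the rewrite author's own statement) =====
-- stated objective: simpler
-- what changed: Replaces A's interleaved 4-branch membership case analysis with two phases: flatten the input into a weighted token stream ((a,1),(b,1) for pairs, (a,0) for singles) and then a single uniform d[t]=d.get(t,0)+delta fold.
import Mathlib
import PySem

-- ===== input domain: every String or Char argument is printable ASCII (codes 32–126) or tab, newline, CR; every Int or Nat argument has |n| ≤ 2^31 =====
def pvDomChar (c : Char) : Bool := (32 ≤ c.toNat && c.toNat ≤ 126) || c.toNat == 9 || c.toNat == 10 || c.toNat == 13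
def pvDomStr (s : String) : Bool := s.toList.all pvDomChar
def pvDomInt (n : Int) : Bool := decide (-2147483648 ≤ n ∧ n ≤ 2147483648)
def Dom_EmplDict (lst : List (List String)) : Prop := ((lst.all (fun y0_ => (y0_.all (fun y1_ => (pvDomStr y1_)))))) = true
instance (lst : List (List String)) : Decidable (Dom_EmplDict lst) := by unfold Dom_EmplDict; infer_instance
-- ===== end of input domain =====

-- B replaces A's interleaved 4-branch membership case analysis with two phases: flatten the
-- input into a weighted token stream, then one uniform d[t]=d.get(t,0)+delta fold (same cost).


-- ===== PORT A =====
-- loop body of A (one iteration of the for-loop, branches in source order)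
def emplStepA (d : PySem.Dict String Int) (item : List String) : PySem.Dict String Int :=
  let tmp1 := (PySem.List.pyGet? item 0).getD ""
  let tmp2 := if 1 < item.length then (PySem.List.pyGet? item 1).getD "" else ""
  let d1 :=
    if d.contains tmp1 ∧ tmp2 ≠ "" then d.insert tmp1 (d.getD tmp1 0 + 1)
    else if d.contains tmp1 ∧ tmp2 = "" then d
    else if ¬ d.contains tmp1 ∧ tmp2 ≠ "" then d.insert tmp1 1
    else if ¬ d.contains tmp1 ∧ tmp2 = "" then d.insert tmp1 0
    else d
  if tmp2 ≠ "" then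
    (if d1.contains tmp2 then d1.insert tmp2 (d1.getD tmp2 0 + 1) else d1.insert tmp2 1)
  else d1

def EmplDict (lst : List (List String)) : List (String × Int) :=
  ((PySem.List.pyRange 0 lst.length 1).foldl
    (fun d i => emplStepA d (PySem.List.pyGetD lst i [])) PySem.Dict.empty).items

-- ===== PORT B =====
-- the weighted tokens one input item contributes
def emplTokens (item : List String) : List (String × Int) :=
  let a := (PySem.List.pyGet? item 0).getD ""
  let b := if 1 < item.length then (PySem.List.pyGet? item 1).getD "" else ""
  if b ≠ "" then [(a, 1), (b, 1)] else [(a, 0)]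

def EmplDict_alt (lst : List (List String)) : List (String × Int) :=
  let tokens := lst.foldl (fun acc item => acc ++ emplTokens item) []
  (tokens.foldl (fun d p => d.insert p.1 (d.getD p.1 0 + p.2)) PySem.Dict.empty).items

-- ===== PRECONDITION & SPEC =====
-- A raises IndexError at lst[i][0] on any empty inner list (and so does B); Pre_ excludes those.
def Pre_EmplDict (lst : List (List String)) : Prop := ∀ item ∈ lst, item ≠ []
instance (lst : List (List String)) : Decidable (Pre_EmplDict lst) := by unfold Pre_EmplDict; infer_instance
def pvWitness_EmplDict : List (List String) := [["alice", "bob"], ["carol"], ["bob", "alice"]]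

def Spec_EmplDict (lst : List (List String)) (out : List (String × Int)) : Prop := out = EmplDict_alt lst
instance (lst : List (List String)) (out : List (String × Int)) : Decidable (Spec_EmplDict lst out) := by unfold Spec_EmplDict; infer_instance

-- ===== CLAIM (what is proved, stated in full; the proofs are below) =====
def Claim_equal_EmplDict : Prop := ∀ (lst : List (List String)), Dom_EmplDict lst → Pre_EmplDict lst → Spec_EmplDict lst (EmplDict lst)

-- ===== LEMMAS AND PROOFS =====

-- re-inserting a present key with its current value leaves the dict unchanged
theorem insert_getD_of_contains {κ ν : Type} [BEq κ] [LawfulBEq κ]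
    (d : PySem.Dict κ ν) (k : κ) (v0 : ν) (hnd : d.keys.Nodup) (hc : d.contains k = true) :
    d.insert k (d.getD k v0) = d := by
  apply PySem.Dict.ext
  rw [PySem.Dict.items_insert_of_contains d (d.getD k v0) hc]
  have h : ∀ p ∈ d.items, (if (p.1 == k) = true then (k, d.getD k v0) else p) = p := by
    rintro ⟨p1, p2⟩ hp
    split_ifs with hk
    · simp only [beq_iff_eq] at hk
      subst hk
      rw [PySem.Dict.getD_of_mem_items d hp hnd v0]
    · rfl
  rw [List.map_congr_left h]
  simp

theorem step_eq (d : PySem.Dict String Int) (item : List String) (h : d.keys.Nodup) :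
    emplStepA d item =
      (emplTokens item).foldl (fun d p => d.insert p.1 (d.getD p.1 0 + p.2)) d := by
  unfold emplStepA emplTokens
  set a := (PySem.List.pyGet? item 0).getD "" with ha
  set b := (if 1 < item.length then (PySem.List.pyGet? item 1).getD "" else "") with hbd
  by_cases hb : b = ""
  · by_cases hc : d.contains a = true
    · have hd : d.insert a (d.getD a 0) = d := insert_getD_of_contains d a 0 h hc
      simp [hb, hc, hd]
    · have h0 : d.getD a 0 = 0 := PySem.Dict.getD_of_not_contains d 0 (by simpa using hc)
      simp [hb, hc, h0]
  · by_cases hc : d.contains a = true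
    · by_cases hcb : (d.insert a (d.getD a 0 + 1)).contains b = true
      · simp [hb, hc, hcb]
      · have h1 : (d.insert a (d.getD a 0 + 1)).getD b 0 = 0 :=
          PySem.Dict.getD_of_not_contains _ 0 (by simpa using hcb)
        simp [hb, hc, hcb, h1]
    · have h0 : d.getD a 0 = 0 := PySem.Dict.getD_of_not_contains d 0 (by simpa using hc)
      by_cases hcb : (d.insert a 1).contains b = true
      · simp [hb, hc, hcb, h0]
      · have h1 : (d.insert a 1).getD b 0 = 0 :=
          PySem.Dict.getD_of_not_contains _ 0 (by simpa using hcb)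
        simp [hb, hc, hcb, h0, h1]

theorem nodup_step (d : PySem.Dict String Int) (item : List String) (h : d.keys.Nodup) :
    (emplStepA d item).keys.Nodup := by
  rw [step_eq d item h]
  exact PySem.Dict.nodup_keys_foldl_insert_key (emplTokens item) Prod.fst
    (fun d p => d.getD p.1 0 + p.2) d h

theorem flat_fold (f : List String → List (String × Int))
    (lst : List (List String)) (d : PySem.Dict String Int) :
    (lst.foldl (fun acc item => acc ++ f item) []).foldl
        (fun d p => d.insert p.1 (d.getD p.1 0 + p.2)) d =
      lst.foldl (fun d item => (f item).foldl (fun d p => d.insert p.1 (d.getD p.1 0 + p.2)) d) d := by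
  rw [PySem.List.foldl_append_eq_flatMap, List.nil_append]
  induction lst generalizing d with
  | nil => rfl
  | cons x xs ih => simp only [List.flatMap_cons, List.foldl_append, List.foldl_cons, ih]

theorem main_fold (lst : List (List String)) (d : PySem.Dict String Int) (h : d.keys.Nodup) :
    lst.foldl emplStepA d =
      lst.foldl (fun d item => (emplTokens item).foldl
        (fun d p => d.insert p.1 (d.getD p.1 0 + p.2)) d) d := by
  induction lst generalizing d with
  | nil => rfl
  | cons x xs ih =>
      simp only [List.foldl_cons]
      rw [step_eq d x h, ← step_eq d x h, ih _ (nodup_step d x h)]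

-- ===== VERDICT (by name: the statement is the Claim_ definition above) =====
theorem EmplDict_spec : Claim_equal_EmplDict := by
  intro lst _ _
  unfold Spec_EmplDict EmplDict EmplDict_alt
  show _ = (((lst.foldl (fun acc item => acc ++ emplTokens item) []).foldl
      (fun d p => d.insert p.1 (d.getD p.1 0 + p.2)) PySem.Dict.empty)).items
  rw [PySem.List.foldl_pyRange_zero_pyGetD' lst [] emplStepA PySem.Dict.empty]
  rw [main_fold lst PySem.Dict.empty PySem.Dict.nodup_keys_empty]
  rw [flat_fold]
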